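-- pv_equiv track=rewrite | github.com/Vishalbokare45/GeoGuide | task6_ver2.py | rem_garbage
-- ===== SOURCE A (Python) =====
-- def rem_garbage(lis):
--     # """
--     # * Function Name: rem_garbage
--     #  * Input:
--     #     - lis (list): A list of elements.
--     #  * Output:
--     #     - updated_list (list): The input list with specified "garbage" elements removed.
--     #  * Logic:
--     #     This function removes specified "garbage" elements from the input list.
--     #     It first defines a list named 'gar' containing the identifiers of garbage elements to be removed.
--     #     Then, it iterates through the input list 'lis' (excluding the first and last elements) to check for garbage elements.
--     #     If an element in 'lis' matches any element in the 'gar' list, it is added to the 'to_remove' list.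
--     #     After iterating through 'lis', the function removes all elements listed in 'to_remove' from 'lis'.
--     #     Finally, it returns the updated list without the garbage elements.
--     #  * Example Call:
--     #     cleaned_list = rem_garbage(input_list)
--     # """
--
--     gar=["14","11","18","15","6"]
--     to_remove=[]
--     for i in range(1,len(lis)-1):
--         if(lis[i] in gar):
--             to_remove.append(lis[i])
--     for i in to_remove:
--         lis.remove(i)
--     return lis
-- ===== SOURCE B (Python) =====
-- def rem_garbage(lis):
--     # Count, per garbage value, its interior occurrences; then one pass over the
--     # list skipping that many first occurrences of each value.
--     # (A mutates lis in place; B builds a new list — equivalence is about the return value.)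
--     gar = {"14", "11", "18", "15", "6"}
--     need = {}
--     for x in lis[1:-1]:
--         if x in gar:
--             need[x] = need.get(x, 0) + 1
--     out = []
--     for x in lis:
--         n = need.get(x, 0)
--         if n:
--             need[x] = n - 1
--         else:
--             out.append(x)
--     return out
-- ===== Notes on version B (the rewrite author's own statement) =====
-- stated objective: alternative
-- what changed: A collects interior garbage values and then calls list.remove (a linear scan) once per collected element and mutates the input in place; B counts interior garbage occurrences per value in one pass and builds a fresh result list in a second pass that skips the first k occurrences of each value (the equivalence is about the return value).
import Mathlib
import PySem

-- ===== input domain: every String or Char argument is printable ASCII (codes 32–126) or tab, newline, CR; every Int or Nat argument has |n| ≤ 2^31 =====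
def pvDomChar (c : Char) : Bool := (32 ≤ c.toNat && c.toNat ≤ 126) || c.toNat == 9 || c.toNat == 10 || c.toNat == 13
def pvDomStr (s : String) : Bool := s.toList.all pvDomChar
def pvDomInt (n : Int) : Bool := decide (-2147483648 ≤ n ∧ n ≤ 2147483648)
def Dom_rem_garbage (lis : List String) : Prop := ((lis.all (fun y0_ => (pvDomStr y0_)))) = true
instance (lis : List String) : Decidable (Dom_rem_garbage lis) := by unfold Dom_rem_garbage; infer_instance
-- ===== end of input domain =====

-- B replaces A's collect-then-list.remove scheme (one linear remove scan per collected
-- element) by a per-value count of interior garbage occurrences and a single pass that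
-- skips the first k occurrences of each value.  A mutates its argument in place, B does
-- not: the equivalence proved here is about the return value.

-- ===== PORT A =====
def rem_garbage (lis : List String) : List String :=
  let gar : List String := ["14", "11", "18", "15", "6"]
  let to_remove : List String :=
    (PySem.List.pyRange 1 ((lis.length : Int) - 1) 1).foldl
      (fun acc i =>
        if gar.contains (PySem.List.pyGetD lis i "") then
          acc ++ [PySem.List.pyGetD lis i ""]
        else acc) []
  -- lis.remove(i): every collected value is still present when removed, so the
  -- ValueError branch (`remove? = none`, defaulted by `.getD l`) is unreachable.
  to_remove.foldl (fun l v => (PySem.List.remove? l v).getD l) lis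

-- ===== PORT B =====
def rem_garbage_alt (lis : List String) : List String :=
  let gar : PySem.Set String := PySem.Set.ofList ["14", "11", "18", "15", "6"]
  let need : PySem.Dict String Int :=
    (PySem.List.slice lis (some 1) (some (-1))).foldl
      (fun d x => if gar.contains x then d.insert x (d.getD x 0 + 1) else d)
      PySem.Dict.empty
  let st := lis.foldl
      (fun (s : PySem.Dict String Int × List String) x =>
        let n := s.1.getD x 0
        if n ≠ 0 then (s.1.insert x (n - 1), s.2) else (s.1, s.2 ++ [x]))
      (need, ([] : List String))
  st.2

-- ===== PRECONDITION & SPEC =====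
def Spec_rem_garbage (lis : List String) (out : List String) : Prop := out = rem_garbage_alt lis
instance (lis : List String) (out : List String) : Decidable (Spec_rem_garbage lis out) := by unfold Spec_rem_garbage; infer_instance

-- ===== CLAIM (what is proved, stated in full; the proofs are below) =====
def Claim_equal_rem_garbage : Prop := ∀ (lis : List String), Dom_rem_garbage lis → Spec_rem_garbage lis (rem_garbage lis)

-- ===== LEMMAS AND PROOFS =====

-- `delF f l`: drop, for each value v, the first (f v) occurrences of v in l.
def delF (f : String → Int) : List String → List String
  | [] => []
  | x :: xs =>
    if f x ≠ 0 then delF (fun u => if u = x then f u - 1 else f u) xs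
    else x :: delF f xs

theorem delF_congr (f g : String → Int) (h : ∀ x, f x = g x) (l : List String) :
    delF f l = delF g l := by
  rw [show f = g from funext h]

theorem delF_zero (f : String → Int) (h : ∀ x, f x = 0) (l : List String) :
    delF f l = l := by
  induction l with
  | nil => rfl
  | cons x xs ih => simp [delF, h x, ih]

theorem remove_getD_eq_delF (l : List String) (v : String) :
    (PySem.List.remove? l v).getD l = delF (fun u => if u = v then 1 else 0) l := by
  induction l with
  | nil =>
    rw [(PySem.List.remove?_eq_none_iff _ _).mpr (by simp)]
    rfl
  | cons x xs ih =>
    by_cases hxv : x = v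
    · subst hxv
      rw [PySem.List.remove?_cons_self, Option.getD_some]
      simp only [delF]
      rw [if_pos (by simp)]
      exact (delF_zero _ (fun u => by by_cases h : u = x <;> simp [h]) xs).symm
    · rw [PySem.List.remove?_cons_of_ne xs hxv]
      simp only [delF]
      rw [if_neg (by simp [hxv])]
      cases h : PySem.List.remove? xs v with
      | none =>
        rw [h] at ih
        simp only [Option.map_none, Option.getD_none]
        rw [← ih]
        rfl
      | some ys =>
        rw [h] at ih
        simp only [Option.map_some, Option.getD_some]
        rw [← ih]
        rfl

theorem del_del (l : List String) (f g : String → Int) (hf : ∀ x, 0 ≤ f x) (hg : ∀ x, 0 ≤ g x) :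
    delF f (delF g l) = delF (fun x => f x + g x) l := by
  induction l generalizing f g with
  | nil => rfl
  | cons x xs ih =>
    by_cases hgx : g x = 0
    · have e1 : delF g (x :: xs) = x :: delF g xs := by
        simp only [delF]; rw [if_neg (by omega)]
      rw [e1]
      by_cases hfx : f x = 0
      · have e2 : delF f (x :: delF g xs) = x :: delF f (delF g xs) := by
          simp only [delF]; rw [if_neg (by omega)]
        have e3 : delF (fun u => f u + g u) (x :: xs) = x :: delF (fun u => f u + g u) xs := by
          simp only [delF]; rw [if_neg (by omega)]
        rw [e2, e3, ih f g hf hg]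
      · have e2 : delF f (x :: delF g xs)
            = delF (fun u => if u = x then f u - 1 else f u) (delF g xs) := by
          simp only [delF]; rw [if_pos hfx]
        have e3 : delF (fun u => f u + g u) (x :: xs)
            = delF (fun u => if u = x then (f u + g u) - 1 else f u + g u) xs := by
          simp only [delF]; rw [if_pos (by omega)]
        rw [e2, e3,
          ih _ g (fun u => by
            have h1 := hf u; have h2 := hf x
            by_cases h : u = x <;> (simp [h]; omega)) hg]
        exact delF_congr _ _ (fun u => by by_cases h : u = x <;> simp [h] <;> omega) xs
    · have e1 : delF g (x :: xs) = delF (fun u => if u = x then g u - 1 else g u) xs := by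
        simp only [delF]; rw [if_pos hgx]
      have e3 : delF (fun u => f u + g u) (x :: xs)
          = delF (fun u => if u = x then (f u + g u) - 1 else f u + g u) xs := by
        simp only [delF]; rw [if_pos (by have := hf x; have := hg x; omega)]
      rw [e1, e3,
        ih f _ hf (fun u => by
          have h1 := hg u; have h2 := hg x
          by_cases h : u = x <;> (simp [h]; omega))]
      exact delF_congr _ _ (fun u => by by_cases h : u = x <;> simp [h] <;> omega) xs

theorem foldl_remove_eq_delF (r l : List String) :
    r.foldl (fun l v => (PySem.List.remove? l v).getD l) l
      = delF (fun v => ((r.count v : Nat) : Int)) l := by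
  induction r generalizing l with
  | nil => exact (delF_zero _ (by simp) l).symm
  | cons v r ih =>
    simp only [List.foldl_cons]
    rw [ih, remove_getD_eq_delF,
      del_del l (fun u => ((r.count u : Nat) : Int)) (fun u => if u = v then 1 else 0)
        (fun u => Int.natCast_nonneg _) (fun u => by by_cases h : u = v <;> simp [h])]
    exact delF_congr _ _ (fun u => by
      by_cases h : u = v
      · simp [h]
      · simp [h, Ne.symm h]) l

theorem pass_snd (l : List String) (c : PySem.Dict String Int) (acc : List String) :
    (l.foldl
      (fun (s : PySem.Dict String Int × List String) x =>
        let n := s.1.getD x 0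
        if n ≠ 0 then (s.1.insert x (n - 1), s.2) else (s.1, s.2 ++ [x]))
      (c, acc)).2
    = acc ++ delF (fun v => c.getD v 0) l := by
  induction l generalizing c acc with
  | nil => simp [delF]
  | cons x xs ih =>
    simp only [List.foldl_cons]
    by_cases h : c.getD x 0 = 0
    · rw [if_neg (by omega)]
      rw [ih]
      have e : delF (fun v => c.getD v 0) (x :: xs) = x :: delF (fun v => c.getD v 0) xs := by
        simp only [delF]; rw [if_neg (by omega)]
      rw [e]
      simp
    · rw [if_pos h]
      rw [ih]
      have e : delF (fun v => c.getD v 0) (x :: xs)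
          = delF (fun u => if u = x then c.getD u 0 - 1 else c.getD u 0) xs := by
        simp only [delF]; rw [if_pos h]
      rw [e]
      congr 1
      exact delF_congr _ _ (fun u => by
        rw [PySem.Dict.getD_insert]
        by_cases hu : u = x <;> simp [hu]) xs

-- the interior of the list, lis[1:-1], as A indexes it …
theorem map_pyRange_eq_interior (lis : List String) :
    (PySem.List.pyRange 1 ((lis.length : Int) - 1) 1).map (fun i => PySem.List.pyGetD lis i "")
      = lis.tail.dropLast := by
  apply List.ext_getElem
  · simp only [List.length_map, PySem.List.length_pyRange_one, List.length_dropLast,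
      List.length_tail]
    omega
  · intro k h1 h2
    have hlen : k + 2 ≤ lis.length := by
      simp only [List.length_map, PySem.List.length_pyRange_one] at h1
      omega
    simp only [List.getElem_map]
    rw [PySem.List.getElem_pyRange_one]
    rw [PySem.List.pyGetD_eq_getElem lis "" (by omega) (by omega)]
    simp only [List.getElem_dropLast, List.getElem_tail]
    congr 1
    omega

-- … and as B slices it
theorem slice_eq_interior (lis : List String) :
    PySem.List.slice lis (some 1) (some (-1)) = lis.tail.dropLast := by
  have hs : PySem.List.slice lis (some 1) (some (-1))
      = (lis.drop (PySem.List.clampIdx lis.length 1)).take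
          (PySem.List.clampIdx lis.length (-1) - PySem.List.clampIdx lis.length 1) := by
    simp [PySem.List.slice]
  have hc : PySem.List.clampIdx lis.length 1 = min 1 lis.length := by
    simpa using PySem.List.clampIdx_natCast lis.length 1
  rw [hs, PySem.List.clampIdx_neg_one, hc]
  rcases Nat.eq_zero_or_pos lis.length with h0 | h0
  · rw [List.eq_nil_of_length_eq_zero h0]; simp
  · rw [show min 1 lis.length = 1 by omega]
    rw [List.dropLast_eq_take, ← List.drop_one]
    congr 1
    simp only [List.length_drop]

-- characterisation of A: drop, per garbage value, as many first occurrences as it has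
-- in the interior of the list
theorem rem_garbage_char (lis : List String) :
    rem_garbage lis
      = delF (fun v =>
          (((lis.tail.dropLast.filter
              (["14", "11", "18", "15", "6"] : List String).contains).count v : Nat) : Int)) lis := by
  unfold rem_garbage
  dsimp only
  rw [PySem.List.foldl_append_if
        (fun i => (["14", "11", "18", "15", "6"] : List String).contains (PySem.List.pyGetD lis i ""))
        (fun i => PySem.List.pyGetD lis i "")]
  rw [List.nil_append, foldl_remove_eq_delF]
  apply delF_congr
  intro v
  have h : ((PySem.List.pyRange 1 ((lis.length : Int) - 1) 1).filter
        (fun i => (["14", "11", "18", "15", "6"] : List String).contains (PySem.List.pyGetD lis i ""))).map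
        (fun i => PySem.List.pyGetD lis i "")
      = lis.tail.dropLast.filter (["14", "11", "18", "15", "6"] : List String).contains := by
    rw [← map_pyRange_eq_interior lis, List.filter_map]
    rfl
  rw [h]

-- characterisation of B: the same delF
theorem rem_garbage_alt_char (lis : List String) :
    rem_garbage_alt lis
      = delF (fun v =>
          (((lis.tail.dropLast.filter
              (["14", "11", "18", "15", "6"] : List String).contains).count v : Nat) : Int)) lis := by
  unfold rem_garbage_alt
  dsimp only
  rw [pass_snd, List.nil_append]
  apply delF_congr
  intro v
  rw [slice_eq_interior,
    ← List.foldl_filter (p := fun x => PySem.Set.contains (PySem.Set.ofList ["14", "11", "18", "15", "6"]) x)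
      (f := fun (d : PySem.Dict String Int) x => d.insert x (d.getD x 0 + 1)),
    PySem.Dict.getD_foldl_insert_add_one, PySem.Dict.getD_empty, zero_add]
  have hset : (fun x => PySem.Set.contains (PySem.Set.ofList ["14", "11", "18", "15", "6"]) x)
      = fun x => (["14", "11", "18", "15", "6"] : List String).contains x := by
    funext x
    rw [show (PySem.Set.ofList ["14", "11", "18", "15", "6"] : PySem.Set String)
          = (["14", "11", "18", "15", "6"] : List String) by decide]
    rfl
  rw [hset]

-- ===== VERDICT (by name: the statement is the Claim_ definition above) =====
theorem rem_garbage_spec : Claim_equal_rem_garbage := by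
  intro lis _
  unfold Spec_rem_garbage
  rw [rem_garbage_char, rem_garbage_alt_char]
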